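-- pv_equiv track=rewrite | github.com/thekoushikdurgas/Deloitte- | test/sql_condition_converter.py | convert_trigger_operations
-- ===== SOURCE A (Python) =====
-- def convert_trigger_operations(condition: str) -> str:
--     """Convert trigger operations to TG_OP format"""
--     # Handle combinations first
--     if 'INSERTING OR UPDATING' in condition:
--         condition = condition.replace('INSERTING OR UPDATING', "TG_OP IN ('INSERT', 'UPDATE')")
--
--     # Handle individual operations
--     for op, replacement in [
--         ('INSERTING', "TG_OP = 'INSERT'"),
--         ('UPDATING', "TG_OP = 'UPDATE'"),
--         ('DELETING', "TG_OP = 'DELETE'")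
--     ]:
--         condition = condition.replace(op, replacement)
--
--     return condition
-- ===== SOURCE B (Python) =====
-- def convert_trigger_operations(condition: str) -> str:
--     """Convert trigger operations to TG_OP format (single left-to-right scan)."""
--     table = [
--         ('INSERTING OR UPDATING', "TG_OP IN ('INSERT', 'UPDATE')"),
--         ('INSERTING', "TG_OP = 'INSERT'"),
--         ('UPDATING', "TG_OP = 'UPDATE'"),
--         ('DELETING', "TG_OP = 'DELETE'"),
--     ]
--     out = []
--     i = 0
--     n = len(condition)
--     while i < n:
--         for key, repl in table:
--             if condition.startswith(key, i):
--                 out.append(repl)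
--                 i += len(key)
--                 break
--         else:
--             out.append(condition[i])
--             i += 1
--     return ''.join(out)
-- ===== Notes on version B (the rewrite author's own statement) =====
-- stated objective: alternative
-- what changed: B replaces A's four sequential full-string str.replace passes (combo first, then three individual keywords) by a single left-to-right scan that at each position substitutes the first matching keyword from an ordered table, so the string is traversed once instead of four times.
import Mathlib
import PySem

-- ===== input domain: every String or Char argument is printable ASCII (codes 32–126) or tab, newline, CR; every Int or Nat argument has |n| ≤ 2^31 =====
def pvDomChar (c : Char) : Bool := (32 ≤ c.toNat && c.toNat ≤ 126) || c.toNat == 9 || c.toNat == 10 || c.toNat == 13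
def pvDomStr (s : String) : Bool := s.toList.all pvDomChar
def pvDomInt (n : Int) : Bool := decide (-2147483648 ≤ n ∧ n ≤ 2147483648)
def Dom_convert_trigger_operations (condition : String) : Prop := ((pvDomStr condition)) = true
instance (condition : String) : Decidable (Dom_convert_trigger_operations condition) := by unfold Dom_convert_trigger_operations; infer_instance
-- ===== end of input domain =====

-- B replaces A's four sequential str.replace passes by one left-to-right scan over an ordered
-- keyword table (combo listed first); equal return value on every input (alternative, not faster).

-- ===== PORT A =====
def convert_trigger_operations (condition : String) : String :=
  -- Handle combinations first
  let condition :=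
    if PySem.Str.isIn "INSERTING OR UPDATING" condition then
      PySem.Str.replace condition "INSERTING OR UPDATING" "TG_OP IN ('INSERT', 'UPDATE')"
    else condition
  -- Handle individual operations
  let condition :=
    [("INSERTING", "TG_OP = 'INSERT'"),
     ("UPDATING", "TG_OP = 'UPDATE'"),
     ("DELETING", "TG_OP = 'DELETE'")].foldl
      (fun condition p => PySem.Str.replace condition p.1 p.2) condition
  condition

-- ===== PORT B =====
-- Source B's ordered keyword→replacement table, on char lists
def pvTable : List (List Char × List Char) :=
  [("INSERTING OR UPDATING".toList, "TG_OP IN ('INSERT', 'UPDATE')".toList),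
   ("INSERTING".toList, "TG_OP = 'INSERT'".toList),
   ("UPDATING".toList, "TG_OP = 'UPDATE'".toList),
   ("DELETING".toList, "TG_OP = 'DELETE'".toList)]

-- Source B's while-loop: at each position substitute the first table key that matches, else copy the char
def pvScan : List Char → List Char
  | [] => []
  | c :: t =>
    match pvTable.find? (fun p => p.1.isPrefixOf (c :: t)) with
    | some (key, repl) => repl ++ pvScan (t.drop (key.length - 1))
    | none => c :: pvScan t
termination_by l => l.length
decreasing_by
  · simp only [List.length_drop, List.length_cons]; omega
  · simp only [List.length_cons]; omega

def convert_trigger_operations_alt (condition : String) : String :=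
  String.ofList (pvScan condition.toList)

-- ===== PRECONDITION & SPEC =====
def Spec_convert_trigger_operations (condition : String) (out : String) : Prop := out = convert_trigger_operations_alt condition
instance (condition : String) (out : String) : Decidable (Spec_convert_trigger_operations condition out) := by unfold Spec_convert_trigger_operations; infer_instance

-- ===== CLAIM (what is proved, stated in full; the proofs are below) =====
def Claim_equal_convert_trigger_operations : Prop := ∀ (condition : String), Dom_convert_trigger_operations condition → Spec_convert_trigger_operations condition (convert_trigger_operations condition)

-- ===== LEMMAS AND PROOFS =====

def pvK1 : List Char := "INSERTING OR UPDATING".toList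
def pvR1 : List Char := "TG_OP IN ('INSERT', 'UPDATE')".toList
def pvK2 : List Char := "INSERTING".toList
def pvR2 : List Char := "TG_OP = 'INSERT'".toList
def pvK3 : List Char := "UPDATING".toList
def pvR3 : List Char := "TG_OP = 'UPDATE'".toList
def pvK4 : List Char := "DELETING".toList
def pvR4 : List Char := "TG_OP = 'DELETE'".toList

def pvRep (old new : List Char) : List Char → List Char
  | [] => []
  | c :: t =>
    if old.isPrefixOf (c :: t) then new ++ pvRep old new (t.drop (old.length - 1))
    else c :: pvRep old new t
termination_by l => l.length
decreasing_by
  · simp only [List.length_drop, List.length_cons]; omega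
  · simp only [List.length_cons]; omega

theorem pvRep_cons (old new : List Char) (c : Char) (t : List Char) :
    pvRep old new (c :: t) =
      if old.isPrefixOf (c :: t) then new ++ pvRep old new (t.drop (old.length - 1))
      else c :: pvRep old new t := by
  rw [pvRep]

theorem pvGo_spec (old new : List Char) (hold : old ≠ []) :
    ∀ (fuel : Nat) (l acc : List Char), l.length ≤ fuel →
      PySem.Chars.replace.go old new fuel l acc = acc.reverse ++ pvRep old new l := by
  intro fuel
  induction fuel with
  | zero =>
    intro l acc hl
    have : l = [] := List.eq_nil_of_length_eq_zero (Nat.le_zero.mp hl)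
    subst this
    simp [PySem.Chars.replace.go, pvRep]
  | succ n ih =>
    intro l acc hl
    cases l with
    | nil => simp [PySem.Chars.replace.go, pvRep]
    | cons c t =>
      rw [PySem.Chars.replace.go]
      rw [pvRep_cons]
      obtain ⟨m, hm⟩ : ∃ m, old.length = m + 1 := ⟨old.length - 1, by cases old <;> simp_all⟩
      have hlt : t.length ≤ n := by simp at hl; omega
      by_cases hp : old.isPrefixOf (c :: t)
      · simp only [hp, if_true]
        have hd : List.drop old.length (c :: t) = t.drop m := by
          rw [hm, List.drop_succ_cons]
        have hlen : (List.drop old.length (c :: t)).length ≤ n := by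
          rw [hd]; simp [List.length_drop]; omega
        rw [ih _ _ hlen]
        rw [hd, hm]
        simp
      · simp only [hp]
        rw [ih t (c :: acc) hlt]
        simp

theorem pvReplace_eq (s old new : List Char) (hold : old ≠ []) :
    PySem.Chars.replace s old new = pvRep old new s := by
  rw [PySem.Chars.replace]
  have : old.isEmpty = false := by cases old <;> simp_all
  rw [this]
  simp only [Bool.false_eq_true, if_false]
  rw [pvGo_spec old new hold s.length s [] le_rfl]
  simp

theorem pvRep_id (K R0 : List Char) :
    ∀ (n : Nat) (l : List Char), l.length ≤ n → ¬ K <:+: l → pvRep K R0 l = l := by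
  intro n
  induction n with
  | zero =>
    intro l hl _
    have : l = [] := List.eq_nil_of_length_eq_zero (Nat.le_zero.mp hl)
    subst this; simp [pvRep]
  | succ n ih =>
    intro l hl h
    cases l with
    | nil => simp [pvRep]
    | cons c t =>
      rw [pvRep_cons]
      have hp : ¬ K.isPrefixOf (c :: t) := by
        intro hp
        exact h (List.IsPrefix.isInfix (List.isPrefixOf_iff_prefix.mp hp))
      have hrec := ih t (by simp at hl; omega) (fun ht => h (ht.trans (List.suffix_cons c t).isInfix))
      simp [hp, hrec]

theorem pvPrefix_split (s a b : List Char) (h : s <+: a ++ b) : s <+: a ∨ a <+: s :=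
  List.prefix_or_prefix_of_prefix h (List.prefix_append a b)

theorem pvPrefix_left (s a b : List Char) (h : s <+: a ++ b) (hl : s.length ≤ a.length) :
    s <+: a := by
  rcases pvPrefix_split s a b h with h' | h'
  · exact h'
  · exact (List.IsPrefix.eq_of_length_le h' hl) ▸ List.prefix_refl a

theorem pvRep_blind (K R0 a : List Char)
    (hC : ∀ i, i < a.length → ¬ a.drop i <+: K ∧ ¬ K <+: a.drop i) :
    ∀ X, pvRep K R0 (a ++ X) = a ++ pvRep K R0 X := by
  induction a with
  | nil => intro X; simp
  | cons c a' ih =>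
    intro X
    have hp : ¬ K.isPrefixOf (c :: (a' ++ X)) := by
      intro hp
      rcases pvPrefix_split K (c :: a') X (by simpa using List.isPrefixOf_iff_prefix.mp hp) with h' | h'
      · exact (hC 0 (by simp)).2 (by simpa using h')
      · exact (hC 0 (by simp)).1 (by simpa using h')
    have hC' : ∀ i, i < a'.length → ¬ a'.drop i <+: K ∧ ¬ K <+: a'.drop i := by
      intro i hi
      have := hC (i + 1) (by simp; omega)
      simpa using this
    rw [List.cons_append, pvRep_cons]
    simp only [hp]
    rw [ih hC']
    simp

theorem pvRep_peel (K R0 : List Char) :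
    ∀ (a : List Char),
      (∀ i, i < a.length → 0 < i → ¬ a.drop i <+: K ∧ ¬ K <+: a.drop i) →
      ∀ X, ¬ K <+: (a ++ X) → pvRep K R0 (a ++ X) = a ++ pvRep K R0 X := by
  intro a
  induction a with
  | nil => intro _ X _; simp
  | cons c a' ih =>
    intro hC X h0
    have hp : ¬ K.isPrefixOf (c :: (a' ++ X)) := by
      intro hp
      exact h0 (by simpa using List.isPrefixOf_iff_prefix.mp hp)
    rw [List.cons_append, pvRep_cons]
    simp only [hp]
    cases a' with
    | nil => simp
    | cons d a'' =>
      have h0' : ¬ K <+: ((d :: a'') ++ X) := by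
        intro h
        rcases pvPrefix_split K (d :: a'') X h with h' | h'
        · exact (hC 1 (by simp) (by omega)).2 (by simpa using h')
        · exact (hC 1 (by simp) (by omega)).1 (by simpa using h')
      have hC' : ∀ i, i < (d :: a'').length → 0 < i → ¬ (d :: a'').drop i <+: K ∧ ¬ K <+: (d :: a'').drop i := by
        intro i hlen hi
        have := hC (i + 1) (by simp at hlen ⊢; omega) (by omega)
        simpa using this
      rw [ih hC' X h0']
      simp

theorem pvRep_match (K R0 : List Char) (hK : K ≠ []) (X : List Char) :
    pvRep K R0 (K ++ X) = R0 ++ pvRep K R0 X := by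
  cases K with
  | nil => exact absurd rfl hK
  | cons c K' =>
    rw [List.cons_append, pvRep_cons]
    have hp : (c :: K').isPrefixOf (c :: (K' ++ X)) := by
      rw [List.isPrefixOf_iff_prefix]
      exact List.cons_prefix_cons.mpr ⟨rfl, List.prefix_append K' X⟩
    simp only [hp, if_true, List.length_cons, Nat.add_sub_cancel]
    rw [List.drop_left]

theorem pvRep_suffix_pres (K R0 k : List Char)
    (hchk : ∀ s ∈ k.tails, s ≠ [] → ¬ s <+: R0)
    (hlen : ∀ s ∈ k.tails, s.length ≤ R0.length) :
    ∀ (n : Nat) (l : List Char), l.length ≤ n → ∀ s, s <:+ k → s <+: pvRep K R0 l → s <+: l := by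
  intro n
  induction n with
  | zero =>
    intro l hl s hsk hsp
    have : l = [] := List.eq_nil_of_length_eq_zero (Nat.le_zero.mp hl)
    subst this
    simpa [pvRep] using hsp
  | succ n ih =>
    intro l hl s hsk hsp
    cases l with
    | nil => simpa [pvRep] using hsp
    | cons c t =>
      rw [pvRep_cons] at hsp
      by_cases hp : K.isPrefixOf (c :: t)
      · simp only [hp, if_true] at hsp
        rcases s with _ | ⟨d, s'⟩
        · exact List.nil_prefix
        · exfalso
          have hmem : (d :: s') ∈ k.tails := (List.mem_tails _ _).mpr hsk
          have hle : (d :: s').length ≤ R0.length := hlen _ hmem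
          exact hchk _ hmem (by simp) (pvPrefix_left _ _ _ hsp hle)
      · simp only [hp] at hsp
        rcases s with _ | ⟨d, s'⟩
        · exact List.nil_prefix
        · obtain ⟨hdc, hs'⟩ := List.cons_prefix_cons.mp hsp
          have hs'k : s' <:+ k := (List.suffix_cons d s').trans hsk
          have := ih t (by simp at hl; omega) s' hs'k hs'
          exact List.cons_prefix_cons.mpr ⟨hdc, this⟩

theorem pvTable_eq : pvTable = [(pvK1, pvR1), (pvK2, pvR2), (pvK3, pvR3), (pvK4, pvR4)] := rfl

theorem pvDropEq (K X t : List Char) (c : Char) (hK : K ≠ []) (h : c :: t = K ++ X) :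
    t.drop (K.length - 1) = X := by
  cases K with
  | nil => exact absurd rfl hK
  | cons d K' =>
    rw [List.cons_append] at h
    injection h with _ h2
    subst h2
    simp

theorem pvScan_cons (c : Char) (t : List Char) :
    pvScan (c :: t) =
      match pvTable.find? (fun p => p.1.isPrefixOf (c :: t)) with
      | some (key, repl) => repl ++ pvScan (t.drop (key.length - 1))
      | none => c :: pvScan t := by
  rw [pvScan]

theorem pvScan_match1 (c : Char) (t : List Char) (h : pvK1.isPrefixOf (c :: t) = true) :
    pvScan (c :: t) = pvR1 ++ pvScan (t.drop 20) := by
  have hfind : pvTable.find? (fun p => p.1.isPrefixOf (c :: t)) = some (pvK1, pvR1) := by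
    rw [pvTable_eq]; exact List.find?_cons_of_pos (by simpa using h)
  rw [pvScan_cons, hfind]
  show pvR1 ++ pvScan (t.drop (pvK1.length - 1)) = pvR1 ++ pvScan (t.drop 20)
  rw [show pvK1.length - 1 = 20 from by decide]

theorem pvScan_match2 (c : Char) (t : List Char)
    (h1 : pvK1.isPrefixOf (c :: t) = false) (h : pvK2.isPrefixOf (c :: t) = true) :
    pvScan (c :: t) = pvR2 ++ pvScan (t.drop 8) := by
  have hfind : pvTable.find? (fun p => p.1.isPrefixOf (c :: t)) = some (pvK2, pvR2) := by
    rw [pvTable_eq]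
    rw [List.find?_cons_of_neg (by simp only []; rw [h1]; simp)]
    exact List.find?_cons_of_pos (by simpa using h)
  rw [pvScan_cons, hfind]
  show pvR2 ++ pvScan (t.drop (pvK2.length - 1)) = pvR2 ++ pvScan (t.drop 8)
  rw [show pvK2.length - 1 = 8 from by decide]

theorem pvScan_match3 (c : Char) (t : List Char)
    (h1 : pvK1.isPrefixOf (c :: t) = false) (h2 : pvK2.isPrefixOf (c :: t) = false)
    (h : pvK3.isPrefixOf (c :: t) = true) :
    pvScan (c :: t) = pvR3 ++ pvScan (t.drop 7) := by
  have hfind : pvTable.find? (fun p => p.1.isPrefixOf (c :: t)) = some (pvK3, pvR3) := by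
    rw [pvTable_eq]
    rw [List.find?_cons_of_neg (by simp only []; rw [h1]; simp), List.find?_cons_of_neg (by simp only []; rw [h2]; simp)]
    exact List.find?_cons_of_pos (by simpa using h)
  rw [pvScan_cons, hfind]
  show pvR3 ++ pvScan (t.drop (pvK3.length - 1)) = pvR3 ++ pvScan (t.drop 7)
  rw [show pvK3.length - 1 = 7 from by decide]

theorem pvScan_match4 (c : Char) (t : List Char)
    (h1 : pvK1.isPrefixOf (c :: t) = false) (h2 : pvK2.isPrefixOf (c :: t) = false)
    (h3 : pvK3.isPrefixOf (c :: t) = false) (h : pvK4.isPrefixOf (c :: t) = true) :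
    pvScan (c :: t) = pvR4 ++ pvScan (t.drop 7) := by
  have hfind : pvTable.find? (fun p => p.1.isPrefixOf (c :: t)) = some (pvK4, pvR4) := by
    rw [pvTable_eq]
    rw [List.find?_cons_of_neg (by simp only []; rw [h1]; simp), List.find?_cons_of_neg (by simp only []; rw [h2]; simp),
      List.find?_cons_of_neg (by simp only []; rw [h3]; simp)]
    exact List.find?_cons_of_pos (by simpa using h)
  rw [pvScan_cons, hfind]
  show pvR4 ++ pvScan (t.drop (pvK4.length - 1)) = pvR4 ++ pvScan (t.drop 7)
  rw [show pvK4.length - 1 = 7 from by decide]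

theorem pvScan_none (c : Char) (t : List Char)
    (h1 : pvK1.isPrefixOf (c :: t) = false) (h2 : pvK2.isPrefixOf (c :: t) = false)
    (h3 : pvK3.isPrefixOf (c :: t) = false) (h4 : pvK4.isPrefixOf (c :: t) = false) :
    pvScan (c :: t) = c :: pvScan t := by
  have hfind : pvTable.find? (fun p => p.1.isPrefixOf (c :: t)) = none := by
    rw [pvTable_eq]
    rw [List.find?_cons_of_neg (by simp only []; rw [h1]; simp), List.find?_cons_of_neg (by simp only []; rw [h2]; simp),
      List.find?_cons_of_neg (by simp only []; rw [h3]; simp), List.find?_cons_of_neg (by simp only []; rw [h4]; simp)]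
    rfl
  rw [pvScan_cons, hfind]

theorem pvNoPre (K a : List Char) (h1 : ¬ K <+: a) (h2 : ¬ a <+: K) (X : List Char) :
    ¬ K <+: a ++ X := fun h => (pvPrefix_split K a X h).elim h1 h2

theorem pvStep (K R0 k : List Char)
    (hchk : ∀ s ∈ k.tails, s ≠ [] → ¬ s <+: R0)
    (hlen : ∀ s ∈ k.tails, s.length ≤ R0.length)
    (c : Char) (t : List Char) (h : ¬ k <+: c :: t) :
    ¬ k <+: c :: pvRep K R0 t := by
  intro hp
  cases k with
  | nil => exact h (List.nil_prefix)
  | cons d k' =>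
    obtain ⟨hdc, hk'⟩ := List.cons_prefix_cons.mp hp
    have := pvRep_suffix_pres K R0 (d :: k') hchk hlen t.length t le_rfl k'
      (List.suffix_cons d k') hk'
    exact h (List.cons_prefix_cons.mpr ⟨hdc, this⟩)

theorem pvRep_cons_neg (old new : List Char) (c : Char) (t : List Char)
    (h : ¬ old <+: c :: t) : pvRep old new (c :: t) = c :: pvRep old new t := by
  rw [pvRep_cons, if_neg]
  intro hb
  exact h (List.isPrefixOf_iff_prefix.mp hb)

theorem pvMain : ∀ (n : Nat) (l : List Char), l.length ≤ n →
    pvRep pvK4 pvR4 (pvRep pvK3 pvR3 (pvRep pvK2 pvR2 (pvRep pvK1 pvR1 l))) = pvScan l := by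
  intro n
  induction n with
  | zero =>
    intro l hl
    have : l = [] := List.eq_nil_of_length_eq_zero (Nat.le_zero.mp hl)
    subst this
    simp [pvRep, pvScan]
  | succ n ih =>
    intro l hl
    cases l with
    | nil => simp [pvRep, pvScan]
    | cons c t =>
      by_cases h1 : pvK1 <+: c :: t
      · obtain ⟨X, hX⟩ := h1
        have hb1 : pvK1.isPrefixOf (c :: t) = true := List.isPrefixOf_iff_prefix.mpr ⟨X, hX⟩
        have hdrop : t.drop 20 = X := by
          have := pvDropEq pvK1 X t c (by decide) hX.symm
          rwa [show pvK1.length - 1 = 20 from by decide] at this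
        have hXlen : X.length ≤ n := by
          have hkl : pvK1.length = 21 := by decide
          have := congrArg List.length hX
          simp [List.length_append] at this hl ⊢
          omega
        rw [pvScan_match1 c t hb1, hdrop]
        conv_lhs => rw [← hX]
        rw [pvRep_match pvK1 pvR1 (by decide) X,
          pvRep_blind pvK2 pvR2 pvR1 (by decide) _,
          pvRep_blind pvK3 pvR3 pvR1 (by decide) _,
          pvRep_blind pvK4 pvR4 pvR1 (by decide) _,
          ih X hXlen]
      · by_cases h2 : pvK2 <+: c :: t
        · obtain ⟨X, hX⟩ := h2
          have hb1 : pvK1.isPrefixOf (c :: t) = false := Bool.eq_false_iff.mpr (fun hb => h1 (List.isPrefixOf_iff_prefix.mp hb))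
          have hb2 : pvK2.isPrefixOf (c :: t) = true := List.isPrefixOf_iff_prefix.mpr ⟨X, hX⟩
          have hdrop : t.drop 8 = X := by
            have := pvDropEq pvK2 X t c (by decide) hX.symm
            rwa [show pvK2.length - 1 = 8 from by decide] at this
          have hXlen : X.length ≤ n := by
            have hkl : pvK2.length = 9 := by decide
            have := congrArg List.length hX
            simp [List.length_append] at this hl ⊢
            omega
          rw [pvScan_match2 c t hb1 hb2, hdrop]
          conv_lhs => rw [← hX]
          rw [pvRep_peel pvK1 pvR1 pvK2 (by decide) X (hX ▸ h1),
            pvRep_match pvK2 pvR2 (by decide) _,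
            pvRep_blind pvK3 pvR3 pvR2 (by decide) _,
            pvRep_blind pvK4 pvR4 pvR2 (by decide) _,
            ih X hXlen]
        · by_cases h3 : pvK3 <+: c :: t
          · obtain ⟨X, hX⟩ := h3
            have hb1 : pvK1.isPrefixOf (c :: t) = false := Bool.eq_false_iff.mpr (fun hb => h1 (List.isPrefixOf_iff_prefix.mp hb))
            have hb2 : pvK2.isPrefixOf (c :: t) = false := Bool.eq_false_iff.mpr (fun hb => h2 (List.isPrefixOf_iff_prefix.mp hb))
            have hb3 : pvK3.isPrefixOf (c :: t) = true := List.isPrefixOf_iff_prefix.mpr ⟨X, hX⟩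
            have hdrop : t.drop 7 = X := by
              have := pvDropEq pvK3 X t c (by decide) hX.symm
              rwa [show pvK3.length - 1 = 7 from by decide] at this
            have hXlen : X.length ≤ n := by
              have hkl : pvK3.length = 8 := by decide
              have := congrArg List.length hX
              simp [List.length_append] at this hl ⊢
              omega
            rw [pvScan_match3 c t hb1 hb2 hb3, hdrop]
            conv_lhs => rw [← hX]
            rw [pvRep_peel pvK1 pvR1 pvK3 (by decide) X (hX ▸ h1),
              pvRep_peel pvK2 pvR2 pvK3 (by decide) _
                (pvNoPre pvK2 pvK3 (by decide) (by decide) _),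
              pvRep_match pvK3 pvR3 (by decide) _,
              pvRep_blind pvK4 pvR4 pvR3 (by decide) _,
              ih X hXlen]
          · by_cases h4 : pvK4 <+: c :: t
            · obtain ⟨X, hX⟩ := h4
              have hb1 : pvK1.isPrefixOf (c :: t) = false := Bool.eq_false_iff.mpr (fun hb => h1 (List.isPrefixOf_iff_prefix.mp hb))
              have hb2 : pvK2.isPrefixOf (c :: t) = false := Bool.eq_false_iff.mpr (fun hb => h2 (List.isPrefixOf_iff_prefix.mp hb))
              have hb3 : pvK3.isPrefixOf (c :: t) = false := Bool.eq_false_iff.mpr (fun hb => h3 (List.isPrefixOf_iff_prefix.mp hb))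
              have hb4 : pvK4.isPrefixOf (c :: t) = true := List.isPrefixOf_iff_prefix.mpr ⟨X, hX⟩
              have hdrop : t.drop 7 = X := by
                have := pvDropEq pvK4 X t c (by decide) hX.symm
                rwa [show pvK4.length - 1 = 7 from by decide] at this
              have hXlen : X.length ≤ n := by
                have hkl : pvK4.length = 8 := by decide
                have := congrArg List.length hX
                simp [List.length_append] at this hl ⊢
                omega
              rw [pvScan_match4 c t hb1 hb2 hb3 hb4, hdrop]
              conv_lhs => rw [← hX]
              rw [pvRep_peel pvK1 pvR1 pvK4 (by decide) X (hX ▸ h1),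
                pvRep_peel pvK2 pvR2 pvK4 (by decide) _
                  (pvNoPre pvK2 pvK4 (by decide) (by decide) _),
                pvRep_peel pvK3 pvR3 pvK4 (by decide) _
                  (pvNoPre pvK3 pvK4 (by decide) (by decide) _),
                pvRep_match pvK4 pvR4 (by decide) _,
                ih X hXlen]
            · have hb1 : pvK1.isPrefixOf (c :: t) = false := Bool.eq_false_iff.mpr (fun hb => h1 (List.isPrefixOf_iff_prefix.mp hb))
              have hb2 : pvK2.isPrefixOf (c :: t) = false := Bool.eq_false_iff.mpr (fun hb => h2 (List.isPrefixOf_iff_prefix.mp hb))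
              have hb3 : pvK3.isPrefixOf (c :: t) = false := Bool.eq_false_iff.mpr (fun hb => h3 (List.isPrefixOf_iff_prefix.mp hb))
              have hb4 : pvK4.isPrefixOf (c :: t) = false := Bool.eq_false_iff.mpr (fun hb => h4 (List.isPrefixOf_iff_prefix.mp hb))
              have n2 : ¬ pvK2 <+: c :: pvRep pvK1 pvR1 t :=
                pvStep pvK1 pvR1 pvK2 (by decide) (by decide) c t h2
              have n3 : ¬ pvK3 <+: c :: pvRep pvK2 pvR2 (pvRep pvK1 pvR1 t) :=
                pvStep pvK2 pvR2 pvK3 (by decide) (by decide) c _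
                  (pvStep pvK1 pvR1 pvK3 (by decide) (by decide) c t h3)
              have n4 : ¬ pvK4 <+: c :: pvRep pvK3 pvR3 (pvRep pvK2 pvR2 (pvRep pvK1 pvR1 t)) :=
                pvStep pvK3 pvR3 pvK4 (by decide) (by decide) c _
                  (pvStep pvK2 pvR2 pvK4 (by decide) (by decide) c _
                    (pvStep pvK1 pvR1 pvK4 (by decide) (by decide) c t h4))
              rw [pvScan_none c t hb1 hb2 hb3 hb4,
                pvRep_cons_neg pvK1 pvR1 c t h1,
                pvRep_cons_neg pvK2 pvR2 c _ n2,
                pvRep_cons_neg pvK3 pvR3 c _ n3,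
                pvRep_cons_neg pvK4 pvR4 c _ n4,
                ih t (by simp at hl; omega)]


theorem convert_trigger_operations_spec : Claim_equal_convert_trigger_operations := by
  unfold Claim_equal_convert_trigger_operations
  intro s _
  unfold Spec_convert_trigger_operations
  simp only [convert_trigger_operations, convert_trigger_operations_alt, List.foldl]
  have hstep : (if PySem.Str.isIn "INSERTING OR UPDATING" s then
      PySem.Str.replace s "INSERTING OR UPDATING" "TG_OP IN ('INSERT', 'UPDATE')" else s).toList
      = pvRep pvK1 pvR1 s.toList := by
    by_cases hin : PySem.Str.isIn "INSERTING OR UPDATING" s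
    · rw [if_pos hin, PySem.Str.replace, String.toList_ofList]
      exact pvReplace_eq _ _ _ (by decide)
    · rw [if_neg hin]
      have hni : ¬ ("INSERTING OR UPDATING".toList <:+: s.toList) := by
        intro h
        exact hin ((PySem.Str.isIn_iff_infix _ _).mpr h)
      exact (pvRep_id pvK1 pvR1 s.toList.length s.toList le_rfl hni).symm
  rw [PySem.Str.replace, PySem.Str.replace, PySem.Str.replace,
    String.toList_ofList, String.toList_ofList]
  rw [hstep]
  rw [pvReplace_eq _ _ _ (by decide), pvReplace_eq _ _ _ (by decide),
    pvReplace_eq _ _ _ (by decide)]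
  exact congrArg String.ofList (pvMain s.toList.length s.toList le_rfl)
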